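-- pv_equiv track=rewrite | github.com/ihemmige/comp_genomics_class | hw2/auxiliary_code/q6b.py | find_extreme_base_quality
-- ===== SOURCE A (Python) =====
-- def phred33_to_q(qual):
--   """ Turn Phred+33 ASCII-encoded quality into Phred-scaled integer """
--   return ord(qual)-33
--
-- def find_extreme_base_quality(reads):
--   ct_under_10 = ct_30 = 0
--   for read in reads:
--     quality = read[2]
--     for c in quality:
--       q = phred33_to_q(c)
--       ct_under_10 += q < 10
--       ct_30 += q >= 30
--   return ct_under_10, ct_30
-- ===== SOURCE B (Python) =====
-- def find_extreme_base_quality(reads):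
--   # histogram of quality chars first, then aggregate grouped counts
--   hist = {}
--   for read in reads:
--     for c in read[2]:
--       hist[c] = hist.get(c, 0) + 1
--   ct_under_10 = sum(n for ch, n in hist.items() if ord(ch) - 33 < 10)
--   ct_30 = sum(n for ch, n in hist.items() if ord(ch) - 33 >= 30)
--   return ct_under_10, ct_30
-- ===== Notes on version B (the rewrite author's own statement) =====
-- stated objective: alternative
-- what changed: B builds a character histogram (dict) across all quality strings and then computes both totals in a second pass over the distinct (char, count) items, instead of testing and incrementing per character.
import Mathlib
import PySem

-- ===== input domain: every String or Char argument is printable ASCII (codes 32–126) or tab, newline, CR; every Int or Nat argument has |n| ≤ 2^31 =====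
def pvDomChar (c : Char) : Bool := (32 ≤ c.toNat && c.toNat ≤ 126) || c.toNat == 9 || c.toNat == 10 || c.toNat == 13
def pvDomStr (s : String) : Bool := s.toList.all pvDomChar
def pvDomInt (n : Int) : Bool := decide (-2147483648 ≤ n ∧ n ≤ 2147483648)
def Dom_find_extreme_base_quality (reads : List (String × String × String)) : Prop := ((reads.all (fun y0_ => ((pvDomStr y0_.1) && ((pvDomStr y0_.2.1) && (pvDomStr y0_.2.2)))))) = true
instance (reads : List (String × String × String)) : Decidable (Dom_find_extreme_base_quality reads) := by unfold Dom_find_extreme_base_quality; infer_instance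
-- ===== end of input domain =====

-- B differs from A as an alternative decomposition (histogram first, then aggregate
-- grouped counts); the return values are proved equal on all inputs.

-- ===== PORT A =====
def phred33_to_q (c : Char) : Int := (c.toNat : Int) - 33

def find_extreme_base_quality (reads : List (String × String × String)) : Int × Int :=
  reads.foldl
    (fun acc read =>
      read.2.2.toList.foldl
        (fun (acc : Int × Int) c =>
          let q := phred33_to_q c
          (acc.1 + (if q < 10 then 1 else 0), acc.2 + (if q ≥ 30 then 1 else 0)))
        acc)
    (0, 0)

-- ===== PORT B =====
def find_extreme_base_quality_alt (reads : List (String × String × String)) : Int × Int :=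
  let hist : PySem.Dict Char Int :=
    reads.foldl
      (fun d read =>
        read.2.2.toList.foldl (fun (d : PySem.Dict Char Int) c => d.insert c (d.getD c 0 + 1)) d)
      PySem.Dict.empty
  let ct_under_10 := ((hist.items.filter (fun p => (p.1.toNat : Int) - 33 < 10)).map (·.2)).sum
  let ct_30 := ((hist.items.filter (fun p => (p.1.toNat : Int) - 33 ≥ 30)).map (·.2)).sum
  (ct_under_10, ct_30)

-- ===== PRECONDITION & SPEC =====
def Spec_find_extreme_base_quality (reads : List (String × String × String)) (out : Int × Int) : Prop := out = find_extreme_base_quality_alt reads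
instance (reads : List (String × String × String)) (out : Int × Int) : Decidable (Spec_find_extreme_base_quality reads out) := by unfold Spec_find_extreme_base_quality; infer_instance

-- ===== CLAIM (what is proved, stated in full; the proofs are below) =====
def Claim_equal_find_extreme_base_quality : Prop := ∀ (reads : List (String × String × String)), Dom_find_extreme_base_quality reads → Spec_find_extreme_base_quality reads (find_extreme_base_quality reads)

-- ===== LEMMAS AND PROOFS =====

-- all quality characters, in order
def pvAllQ (reads : List (String × String × String)) : List Char :=
  reads.flatMap (fun read => read.2.2.toList)

-- A's inner/outer fold counts the two predicates over the concatenation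
lemma pvA_inner (l : List Char) (a b : Int) :
    l.foldl
      (fun (acc : Int × Int) c =>
        let q := phred33_to_q c
        (acc.1 + (if q < 10 then 1 else 0), acc.2 + (if q ≥ 30 then 1 else 0)))
      (a, b)
    = (a + (l.countP (fun c => phred33_to_q c < 10) : Int),
       b + (l.countP (fun c => phred33_to_q c ≥ 30) : Int)) := by
  induction l generalizing a b with
  | nil => simp
  | cons c l ih =>
      simp only [List.foldl_cons, List.countP_cons, ih, Prod.mk.injEq, decide_eq_true_eq]
      refine ⟨?_, ?_⟩ <;> split_ifs <;> push_cast <;> ring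

lemma pvA_eq (reads : List (String × String × String)) :
    find_extreme_base_quality reads
    = (((pvAllQ reads).countP (fun c => phred33_to_q c < 10) : Int),
       ((pvAllQ reads).countP (fun c => phred33_to_q c ≥ 30) : Int)) := by
  unfold find_extreme_base_quality pvAllQ
  rw [← List.foldl_flatMap]
  have := pvA_inner (reads.flatMap (fun read => read.2.2.toList)) 0 0
  simpa using this

-- B's histogram is the counter of the concatenation
lemma pvB_hist (reads : List (String × String × String)) :
    reads.foldl
      (fun d read =>
        read.2.2.toList.foldl (fun (d : PySem.Dict Char Int) c => d.insert c (d.getD c 0 + 1)) d)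
      PySem.Dict.empty
    = PySem.Dict.counter (pvAllQ reads) := by
  unfold pvAllQ
  rw [← PySem.Dict.foldl_insert_getD_add_one_eq_counter, ← List.foldl_flatMap]

-- PySem's ordered dedup is a permutation of Mathlib's dedup
lemma pvSet_perm_dedup (xs : List Char) : (PySem.Set.ofList xs).Perm xs.dedup := by
  rw [List.perm_ext_iff_of_nodup (PySem.Set.nodup_ofList xs) xs.nodup_dedup]
  intro a
  rw [PySem.Set.mem_ofList, List.mem_dedup]

-- summing grouped counts over the distinct keys satisfying p is countP p
lemma pvSum_counts (p : Char → Bool) (xs : List Char) :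
    ((((PySem.Set.ofList xs).map (fun k => (k, (xs.count k : Int)))).filter
        (fun q => p q.1)).map (·.2)).sum
    = ((xs.countP p : Nat) : Int) := by
  have hperm :
      ((((PySem.Set.ofList xs).map (fun k => (k, (xs.count k : Int)))).filter
          (fun q => p q.1)).map (·.2)).Perm
        (((xs.dedup.map (fun k => (k, (xs.count k : Int)))).filter
          (fun q => p q.1)).map (·.2)) :=
    (((pvSet_perm_dedup xs).map _).filter _).map _
  rw [hperm.sum_eq, List.filter_map, List.map_map,
      ← List.sum_map_count_dedup_filter_eq_countP p xs, Nat.cast_list_sum, List.map_map]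
  rfl

lemma pvB_eq (reads : List (String × String × String)) :
    find_extreme_base_quality_alt reads
    = (((pvAllQ reads).countP (fun c => phred33_to_q c < 10) : Int),
       ((pvAllQ reads).countP (fun c => phred33_to_q c ≥ 30) : Int)) := by
  have h1 := pvSum_counts (fun c => decide ((c.toNat : Int) - 33 < 10)) (pvAllQ reads)
  have h2 := pvSum_counts (fun c => decide ((c.toNat : Int) - 33 ≥ 30)) (pvAllQ reads)
  unfold find_extreme_base_quality_alt
  rw [pvB_hist]
  simp only [PySem.Dict.items_counter, phred33_to_q, Prod.mk.injEq]
  exact ⟨by simpa using h1, by simpa using h2⟩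

-- ===== VERDICT (by name: the statement is the Claim_ definition above) =====
theorem find_extreme_base_quality_spec : Claim_equal_find_extreme_base_quality := by
  intro reads _
  unfold Spec_find_extreme_base_quality
  rw [pvA_eq, pvB_eq]
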